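-- pv_equiv track=rewrite | github.com/jgm0327/baekjoon | 프로그래머스/lv0/120882. 등수 매기기/등수 매기기.py | solution
-- ===== SOURCE A (Python) =====
-- def solution(score):
--     answer = []
--     sum_list = sorted([sum(data) for data in score], reverse=True)
--     rank = {}
--     for idx, s in enumerate(sum_list):
--         if rank.get(s) is not None:
--             continue
--         rank[s] = idx + 1
--     for data in score:
--         answer.append(rank[sum(data)])
--     return answer
-- ===== SOURCE B (Python) =====
-- def solution(score):
--     sums = [sum(row) for row in score]
--     return [1 + sum(1 for t in sums if t > s) for s in sums]
-- ===== Notes on version B (the rewrite author's own statement) =====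
-- stated objective: simpler
-- what changed: Replaces the sort + first-occurrence rank dictionary with direct comparison counting: each row's rank is 1 plus the number of row sums strictly greater than its own.
import Mathlib
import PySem

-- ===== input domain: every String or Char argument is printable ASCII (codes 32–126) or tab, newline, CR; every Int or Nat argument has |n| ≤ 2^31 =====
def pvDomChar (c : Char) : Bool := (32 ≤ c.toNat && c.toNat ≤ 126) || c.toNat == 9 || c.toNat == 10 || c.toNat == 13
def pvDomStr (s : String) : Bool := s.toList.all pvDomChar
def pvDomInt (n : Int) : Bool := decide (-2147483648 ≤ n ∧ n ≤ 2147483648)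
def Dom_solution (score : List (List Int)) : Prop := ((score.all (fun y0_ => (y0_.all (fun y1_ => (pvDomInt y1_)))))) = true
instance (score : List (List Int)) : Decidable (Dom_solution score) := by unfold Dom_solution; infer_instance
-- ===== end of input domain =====

-- B replaces A's sort + first-occurrence rank dictionary by direct comparison counting (simpler; not faster).

-- ===== PORT A =====
-- rank[sum(data)] in A is always a present key (sum(data) ∈ sum_list), so the getD 0
-- lookup is exact: the default 0 is never returned.
def solution (score : List (List Int)) : List Int :=
  let sumList := PySem.List.sorted (score.map (fun data => data.sum)) (fun x => x) true
  let rank := (PySem.List.enumerate sumList).foldl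
    (fun r p =>
      match r.get? p.2 with
      | some _ => r
      | none => r.insert p.2 (p.1 + 1))
    PySem.Dict.empty
  score.foldl (fun answer data => answer ++ [rank.getD data.sum 0]) []

-- ===== PORT B =====
def solution_alt (score : List (List Int)) : List Int :=
  let sums := score.map (fun row => row.sum)
  sums.map (fun s => 1 + (sums.countP (fun t => decide (s < t)) : Int))

-- ===== PRECONDITION & SPEC =====
def Spec_solution (score : List (List Int)) (out : List Int) : Prop := out = solution_alt score
instance (score : List (List Int)) (out : List Int) : Decidable (Spec_solution score out) := by unfold Spec_solution; infer_instance

-- ===== CLAIM (what is proved, stated in full; the proofs are below) =====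
def Claim_equal_solution : Prop := ∀ (score : List (List Int)), Dom_solution score → Spec_solution score (solution score)

-- ===== LEMMAS AND PROOFS =====

-- A's dict-building loop step.
def rankStep (r : PySem.Dict Int Int) (p : Int × Int) : PySem.Dict Int Int :=
  match r.get? p.2 with
  | some _ => r
  | none => r.insert p.2 (p.1 + 1)

-- keys already present keep their value through the loop
lemma rank_get?_preserved (s v : Int) :
    ∀ (t : List Int) (n : Int) (d : PySem.Dict Int Int), d.get? s = some v →
      ((PySem.List.enumerate t n).foldl rankStep d).get? s = some v := by
  intro t
  induction t with
  | nil => intro n d h; simpa [PySem.List.enumerate_nil] using h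
  | cons a t ih =>
    intro n d h
    rw [PySem.List.enumerate_cons, List.foldl_cons]
    by_cases has : a = s
    · subst has
      simp only [rankStep, h]
      exact ih _ _ h
    · simp only [rankStep]
      cases hga : d.get? a with
      | some w => exact ih _ _ h
      | none =>
        exact ih _ _ (by rw [PySem.Dict.get?_insert_of_ne _ _ (fun he => has he.symm)]; exact h)

-- main invariant: on a descending list, a fresh key s gets value n + (#strictly greater) + 1
lemma rank_get?_of_sorted (s : Int) :
    ∀ (t : List Int), t.Pairwise (fun a b => b ≤ a) → s ∈ t →
      ∀ (n : Int) (d : PySem.Dict Int Int), d.contains s = false →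
        ((PySem.List.enumerate t n).foldl rankStep d).get? s
          = some (n + (t.countP (fun x => decide (s < x)) : Int) + 1) := by
  intro t
  induction t with
  | nil => intro _ hmem; cases hmem
  | cons a t ih =>
    intro hpw hmem n d hc
    have hds : d.get? s = none := by
      cases hgs : d.get? s with
      | none => rfl
      | some w =>
        exfalso
        have : d.contains s = true := by
          rw [PySem.Dict.contains_eq_isSome_get?, hgs]; rfl
        simp [this] at hc
    rw [PySem.List.enumerate_cons, List.foldl_cons]
    have hhead : ∀ x ∈ t, x ≤ a := (List.pairwise_cons.mp hpw).1
    by_cases has : a = s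
    · subst has
      -- step inserts s with value n+1; all later elements are ≤ s, so the count is 0
      have hcount : (a :: t).countP (fun x => decide (a < x)) = 0 := by
        rw [List.countP_eq_zero]
        intro x hx
        rcases List.mem_cons.mp hx with rfl | hx
        · simp
        · simpa using not_lt.mpr (hhead x hx)
      rw [hcount]
      simp only [rankStep, hds]
      have : (d.insert a (n + 1)).get? a = some (n + 1) := PySem.Dict.get?_insert_self _ _ _
      rw [rank_get?_preserved a (n+1) t (n+1) _ this]
      norm_num
    · have hst : s ∈ t := by
        rcases List.mem_cons.mp hmem with he | h
        · exact absurd he.symm has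
        · exact h
      have hsa : s < a := lt_of_le_of_ne (hhead s hst) (fun he => has he.symm)
      have hcount : (a :: t).countP (fun x => decide (s < x))
          = t.countP (fun x => decide (s < x)) + 1 := by
        rw [List.countP_cons]
        simp [hsa]
      rw [hcount]
      simp only [rankStep]
      have hrec : ∀ d' : PySem.Dict Int Int, d'.contains s = false →
          ((PySem.List.enumerate t (n+1)).foldl rankStep d').get? s
            = some ((n+1) + (t.countP (fun x => decide (s < x)) : Int) + 1) :=
        fun d' h' => ih (List.pairwise_cons.mp hpw).2 hst (n+1) d' h'
      cases hga : d.get? a with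
      | some w =>
        rw [hrec d hc]; congr 1; push_cast; ring
      | none =>
        have hc' : (d.insert a (n+1)).contains s = false := by
          rw [PySem.Dict.contains_insert]
          simp [hc, Ne.symm has]
        rw [hrec _ hc']; congr 1; push_cast; ring

-- ===== VERDICT (by name: the statement is the Claim_ definition above) =====
theorem solution_spec : Claim_equal_solution := by
  intro score _
  unfold Spec_solution solution solution_alt
  rw [show (fun (r : PySem.Dict Int Int) (p : Int × Int) =>
        match r.get? p.2 with | some _ => r | none => r.insert p.2 (p.1 + 1)) = rankStep from rfl]
  rw [PySem.List.foldl_append_singleton_eq_map]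
  dsimp only
  rw [List.map_map]
  apply List.map_congr_left
  intro row hrow
  have hperm := PySem.List.sorted_perm (score.map (fun data => data.sum)) (fun x : Int => x) true
  have hmem : row.sum ∈ PySem.List.sorted (score.map (fun data => data.sum)) (fun x : Int => x) true :=
    hperm.mem_iff.mpr (List.mem_map.mpr ⟨row, hrow, rfl⟩)
  have hpw := PySem.List.sorted_pairwise_rev (score.map (fun data => data.sum)) (fun x : Int => x)
  have h := rank_get?_of_sorted row.sum _ hpw hmem 0 PySem.Dict.empty rfl
  rw [PySem.Dict.getD_eq_get?_getD, h, Option.getD_some, hperm.countP_eq]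
  simp [Function.comp]
  omega
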